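-- pv_equiv track=rewrite | github.com/finlaymorrison/lab_work | p/p1/prep/simpl.py | determine_value
-- ===== SOURCE A (Python) =====
-- grid = [[0,0,4,3,0,0,2,0,9],
--         [0,0,5,0,0,9,0,0,1],
--         [0,7,0,0,6,0,0,4,3],
--         [0,0,6,0,0,2,0,8,7],
--         [1,9,0,0,0,7,4,0,0],
--         [0,5,0,0,8,3,0,0,0],
--         [6,0,0,0,0,0,1,0,5],
--         [0,0,4,5,0,8,6,9,0],
--         [0,4,2,9,1,0,3,0,0]]
--
-- def determine_value(i, j):
--     nums = [True] + [False] * 9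
--     for pos in range(9):
--         nums[grid[i][pos]] = True
--         nums[grid[pos][j]] = True
--     i_0 = 3 * (i // 3)
--     j_0 = 3 * (j // 3)
--     for pos_i in range(i_0, i_0 + 3):
--         for pos_j in range(j_0, j_0 + 3):
--             print (pos_i, pos_j)
--             nums[grid[pos_i][pos_j]] = True
--
--     found = 0
--     for num in range(1, 10):
--         if not nums[num]:
--             if found:
--                 return 0
--             else:
--                 found = num
--     return found
-- ===== SOURCE B (Python) =====
-- grid = [[0,0,4,3,0,0,2,0,9],
--         [0,0,5,0,0,9,0,0,1],
--         [0,7,0,0,6,0,0,4,3],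
--         [0,0,6,0,0,2,0,8,7],
--         [1,9,0,0,0,7,4,0,0],
--         [0,5,0,0,8,3,0,0,0],
--         [6,0,0,0,0,0,1,0,5],
--         [0,0,4,5,0,8,6,9,0],
--         [0,4,2,9,1,0,3,0,0]]
--
-- def determine_value(i, j):
--     # candidate-major: test each digit 1..9 for membership in row, column and box,
--     # instead of marking every grid value seen.
--     i_0 = 3 * (i // 3)
--     j_0 = 3 * (j // 3)
--     box = []
--     for pos_i in range(i_0, i_0 + 3):
--         for pos_j in range(j_0, j_0 + 3):
--             print (pos_i, pos_j)
--             box.append(grid[pos_i][pos_j])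
--     row = grid[i]
--     candidates = [v for v in range(1, 10)
--                   if v not in row
--                   and all(grid[pos][j] != v for pos in range(9))
--                   and v not in box]
--     return candidates[0] if len(candidates) == 1 else 0
-- ===== Notes on version B (the rewrite author's own statement) =====
-- stated objective: alternative
-- what changed: Inverts the traversal: instead of marking every grid value seen in a 10-slot boolean list and then scanning 1..9 with a found-counter, B loops candidate-major over the digits 1..9, testing each by membership in the row list, the column (an all(...) over the 9 rows) and the collected box list, and returns the single surviving candidate or 0.
import Mathlib
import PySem

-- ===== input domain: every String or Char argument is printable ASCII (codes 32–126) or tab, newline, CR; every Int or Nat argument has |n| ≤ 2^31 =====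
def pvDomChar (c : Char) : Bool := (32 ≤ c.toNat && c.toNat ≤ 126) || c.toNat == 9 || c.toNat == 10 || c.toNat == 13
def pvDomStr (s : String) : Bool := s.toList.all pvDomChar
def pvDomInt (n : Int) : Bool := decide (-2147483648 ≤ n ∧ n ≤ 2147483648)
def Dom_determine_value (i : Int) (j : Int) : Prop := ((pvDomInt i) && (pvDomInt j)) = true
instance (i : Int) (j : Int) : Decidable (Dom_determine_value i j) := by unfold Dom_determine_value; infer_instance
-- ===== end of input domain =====

-- B inverts the traversal: candidate-major membership tests (row / column / box) over the
-- digits 1..9 instead of A's mark-every-seen-value boolean list and found-counter scan.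
-- Return value only: both versions print the same 9 box-coordinate lines.

-- the module-level constant `grid` shared by both versions
def pvGrid : List (List Int) :=
  [[0,0,4,3,0,0,2,0,9],
   [0,0,5,0,0,9,0,0,1],
   [0,7,0,0,6,0,0,4,3],
   [0,0,6,0,0,2,0,8,7],
   [1,9,0,0,0,7,4,0,0],
   [0,5,0,0,8,3,0,0,0],
   [6,0,0,0,0,0,1,0,5],
   [0,0,4,5,0,8,6,9,0],
   [0,4,2,9,1,0,3,0,0]]

-- grid[r][c]; the defaults are never reached under Pre_ (both indices in range)
def pvGridAt (r c : Int) : Int :=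
  PySem.List.pyGetD (PySem.List.pyGetD pvGrid r []) c 0

-- ===== PORT A =====
def determine_value (i : Int) (j : Int) : Int :=
  let nums : List Bool := [true] ++ List.replicate 9 false
  let nums := (PySem.List.pyRange 0 9 1).foldl (fun ns pos =>
    let ns := PySem.List.pySetD ns (pvGridAt i pos) true
    PySem.List.pySetD ns (pvGridAt pos j) true) nums
  let i0 := 3 * PySem.Int.floordiv i 3
  let j0 := 3 * PySem.Int.floordiv j 3
  let nums := (PySem.List.pyRange i0 (i0 + 3) 1).foldl (fun ns posI =>
    (PySem.List.pyRange j0 (j0 + 3) 1).foldl (fun ns posJ =>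
      PySem.List.pySetD ns (pvGridAt posI posJ) true) ns) nums
  -- the 1..9 scan with early return: state = (returned value if any, found)
  let st := (PySem.List.pyRange 1 10 1).foldl (fun (st : Option Int × Int) num =>
    match st with
    | (some r, f) => (some r, f)
    | (none, f) =>
      if !(PySem.List.pyGetD nums num true) then
        if f ≠ 0 then (some 0, f) else (none, num)
      else (none, f)) (none, 0)
  match st with
  | (some r, _) => r
  | (none, f) => f

-- ===== PORT B =====
def determine_value_alt (i : Int) (j : Int) : Int :=
  let i0 := 3 * PySem.Int.floordiv i 3
  let j0 := 3 * PySem.Int.floordiv j 3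
  let box := (PySem.List.pyRange i0 (i0 + 3) 1).foldl (fun b posI =>
    (PySem.List.pyRange j0 (j0 + 3) 1).foldl (fun b posJ =>
      b ++ [pvGridAt posI posJ]) b) ([] : List Int)
  let row := PySem.List.pyGetD pvGrid i []
  let candidates := (PySem.List.pyRange 1 10 1).filter (fun v =>
    !(row.contains v) &&
    (PySem.List.pyRange 0 9 1).all (fun pos => !(pvGridAt pos j == v)) &&
    !(box.contains v))
  if candidates.length = 1 then candidates.headD 0 else 0

-- ===== PRECONDITION & SPEC =====
-- exactly the inputs on which Python A returns: any index outside -9..8 raises IndexError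
def Pre_determine_value (i : Int) (j : Int) : Prop :=
  -9 ≤ i ∧ i ≤ 8 ∧ -9 ≤ j ∧ j ≤ 8
instance (i : Int) (j : Int) : Decidable (Pre_determine_value i j) := by
  unfold Pre_determine_value; infer_instance

def pvWitness_determine_value : Int × Int := (0, 0)

def Spec_determine_value (i : Int) (j : Int) (out : Int) : Prop := out = determine_value_alt i j
instance (i : Int) (j : Int) (out : Int) : Decidable (Spec_determine_value i j out) := by
  unfold Spec_determine_value; infer_instance

-- ===== CLAIM (what is proved, stated in full; the proofs are below) =====
def Claim_equal_determine_value : Prop := ∀ (i : Int) (j : Int), Dom_determine_value i j → Pre_determine_value i j → Spec_determine_value i j (determine_value i j)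

-- ===== LEMMAS AND PROOFS =====

-- ===== VERDICT (by name: the statement is the Claim_ definition above) =====
set_option maxRecDepth 40000 in
theorem determine_value_spec : Claim_equal_determine_value := by
  intro i j _ hpre
  obtain ⟨h1, h2, h3, h4⟩ := hpre
  unfold Spec_determine_value
  interval_cases i <;> interval_cases j <;> decide
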